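-- pv_equiv track=rewrite | github.com/jmsung/einstein | scripts/first_autocorrelation/singer_warmstart.py | mian_chowla
-- ===== SOURCE A (Python) =====
-- def mian_chowla(size: int) -> list[int]:
--     """Greedy Sidon sequence (Mian-Chowla): smallest positive integers such
--     that all pairwise sums are distinct.
--
--     Returns the first ``size`` elements.
--     """
--     seq: list[int] = [0]
--     sums: set[int] = {0}
--     candidate = 1
--     while len(seq) < size:
--         # Try adding candidate
--         new_sums = {candidate + x for x in seq}
--         new_sums.add(2 * candidate)
--         if new_sums.isdisjoint(sums):
--             seq.append(candidate)
--             sums |= new_sums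
--         candidate += 1
--     return seq
-- ===== SOURCE B (Python) =====
-- def mian_chowla(size: int) -> list[int]:
--     """Greedy Sidon sequence (Mian-Chowla), bit-parallel: the attained positive
--     pairwise differences are kept as one big-integer bitmask, and the sequence
--     as a reversed membership bitmask, so testing a candidate c is a single
--     shift-and-AND (no per-candidate set is built) and accepting it is two ORs.
--     c is admissible iff no difference c - x (x in seq) was attained before."""
--     seq = [0]
--     diffbits = 0      # bit d set  <=>  d is an attained positive pairwise difference
--     revbits = 1       # bit (base - x) set  <=>  x in seq
--     base = 0
--     c = 1
--     while len(seq) < size: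
--         if c > base:  # rebase so that base - c stays non-negative (amortised O(1))
--             revbits <<= 2 * c - base
--             base = 2 * c
--         m = revbits >> (base - c)   # bits of m: exactly the differences c - x, x in seq
--         if diffbits & m == 0:
--             seq.append(c)
--             diffbits |= m
--             revbits |= 1 << (base - c)
--         c += 1
--     return seq
-- ===== Notes on version B (the rewrite author's own statement) =====
-- stated objective: alternative
-- what changed: Replaces the hash set of pairwise sums (a fresh candidate-sum set built and tested for disjointness per candidate) with bit-parallel big-integer masks: a difference bitmask plus a reversed membership bitmask, so a candidate is tested with a single shift-and-AND and accepted with two ORs, never building a per-candidate collection.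
import Mathlib
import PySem

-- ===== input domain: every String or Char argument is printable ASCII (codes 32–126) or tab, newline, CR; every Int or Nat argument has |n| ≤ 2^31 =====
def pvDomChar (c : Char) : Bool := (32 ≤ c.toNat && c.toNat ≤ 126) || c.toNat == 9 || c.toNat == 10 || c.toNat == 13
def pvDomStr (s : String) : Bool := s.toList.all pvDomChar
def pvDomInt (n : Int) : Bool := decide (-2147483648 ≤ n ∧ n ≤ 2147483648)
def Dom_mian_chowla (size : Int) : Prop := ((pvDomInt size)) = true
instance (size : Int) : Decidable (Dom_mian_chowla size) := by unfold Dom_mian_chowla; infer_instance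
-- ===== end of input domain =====

-- B keeps the attained pairwise differences and a reversed membership mask as big-integer
-- bitmasks, testing a candidate with one shift-and-AND instead of A's per-candidate sum set.


-- ===== PORT A =====
-- Python's hash sets of ints are ported as Std.HashSet Int (internal only, never returned,
-- so iteration order is never observed: 'isdisjoint' and '|=' are order-independent).
-- The while loop is ported with a fuel counter; each fuel step is exactly one Python iteration.
def mianLoopA (size : Int) : Nat → List Int → Std.HashSet Int → Int → List Int
  | 0, seq, _, _ => seq
  | fuel+1, seq, sums, candidate =>
    if (seq.length : Int) < size then
      -- new_sums = {candidate + x for x in seq}; new_sums.add(2*candidate)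
      let newSums : Std.HashSet Int :=
        (Std.HashSet.ofList (seq.map (fun x => candidate + x))).insert (2 * candidate)
      -- new_sums.isdisjoint(sums)
      if newSums.toList.all (fun y => !sums.contains y) then
        -- seq.append(candidate); sums |= new_sums
        mianLoopA size fuel (seq ++ [candidate]) (sums.insertMany newSums.toList) (candidate + 1)
      else
        mianLoopA size fuel seq sums (candidate + 1)
    else seq

def mian_chowla (size : Int) : List Int :=
  mianLoopA size (2 ^ 100) [0] (Std.HashSet.ofList [0]) 1

-- ===== PORT B =====
-- Python's '<<'/'>>' are Lean's '<<<'/'>>>'; the shift amounts 2*c - base and base - c are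
-- non-negative whenever they are used (the rebase branch guarantees c ≤ base), so '.toNat'
-- is exact there. The while loop is ported with the same fuel counter as A's.
def mianLoopB (size : Int) : Nat → List Int → Int → Int → Int → Int → List Int
  | 0, seq, _, _, _, _ => seq
  | fuel+1, seq, diffbits, revbits, base, c =>
    if (seq.length : Int) < size then
      -- if c > base: revbits <<= 2*c - base; base = 2*c
      let revbits' := if base < c then revbits <<< (2 * c - base).toNat else revbits
      let base' := if base < c then 2 * c else base
      -- m = revbits >> (base - c)
      let m := revbits' >>> (base' - c).toNat
      -- if diffbits & m == 0:
      if PySem.Int.band diffbits m == 0 then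
        -- seq.append(c); diffbits |= m; revbits |= 1 << (base - c)
        mianLoopB size fuel (seq ++ [c]) (PySem.Int.bor diffbits m)
          (PySem.Int.bor revbits' (1 <<< (base' - c).toNat)) base' (c + 1)
      else
        mianLoopB size fuel seq diffbits revbits' base' (c + 1)
    else seq

def mian_chowla_alt (size : Int) : List Int :=
  mianLoopB size (2 ^ 100) [0] 0 1 0 1

-- ===== PRECONDITION & SPEC =====
def Spec_mian_chowla (size : Int) (out : List Int) : Prop := out = mian_chowla_alt size
instance (size : Int) (out : List Int) : Decidable (Spec_mian_chowla size out) := by unfold Spec_mian_chowla; infer_instance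

-- ===== CLAIM (what is proved, stated in full; the proofs are below) =====
def Claim_equal_mian_chowla : Prop := ∀ (size : Int), Dom_mian_chowla size → Spec_mian_chowla size (mian_chowla size)

-- ===== LEMMAS AND PROOFS =====

-- v is an attained positive pairwise difference of seq
def IsDiff (seq : List Int) (v : Int) : Prop := ∃ a ∈ seq, ∃ b ∈ seq, b < a ∧ v = a - b

-- joint invariant of A's state (sums, c) and B's state (diffbits, revbits, base, c)
def BInv (seq : List Int) (sums : Std.HashSet Int) (D R base c : Int) : Prop :=
  (∀ x ∈ seq, 0 ≤ x ∧ x < c) ∧ 1 ≤ c ∧ c ≤ base + 1 ∧ 0 ≤ D ∧ 0 ≤ R ∧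
  (∀ y, y ∈ sums ↔ ∃ a ∈ seq, ∃ b ∈ seq, y = a + b) ∧
  (∀ d : Nat, D.toNat.testBit d = true ↔ IsDiff seq (d : Int)) ∧
  (∀ k : Nat, R.toNat.testBit k = true ↔ ∃ x ∈ seq, (k : Int) = base - x)

theorem land_eq_zero_iff (a b : Nat) :
    a &&& b = 0 ↔ ∀ i, ¬(a.testBit i = true ∧ b.testBit i = true) := by
  constructor
  · intro h i hi
    have := congrArg (fun x => x.testBit i) h
    simp [Nat.testBit_and, hi.1, hi.2] at this
  · intro h
    apply Nat.eq_of_testBit_eq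
    intro i
    simp only [Nat.testBit_and, Nat.zero_testBit, Bool.and_eq_false_iff]
    by_cases ha : a.testBit i = true
    · right
      by_contra hb
      exact h i ⟨ha, by simpa using hb⟩
    · left; simpa using ha

theorem shiftLeft_toNat (a : Int) (s : Nat) (h : 0 ≤ a) :
    (a <<< s).toNat = a.toNat <<< s := by
  have : a = ((a.toNat : Nat) : Int) := (Int.toNat_of_nonneg h).symm
  rw [this]
  rfl

theorem shiftRight_toNat (a : Int) (s : Nat) (h : 0 ≤ a) :
    (a >>> s).toNat = a.toNat >>> s := by
  have : a = ((a.toNat : Nat) : Int) := (Int.toNat_of_nonneg h).symm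
  rw [this]
  rfl

theorem shiftLeft_nonneg (a : Int) (s : Nat) (h : 0 ≤ a) : 0 ≤ a <<< s := by
  have : a = ((a.toNat : Nat) : Int) := (Int.toNat_of_nonneg h).symm
  rw [this]
  exact Int.natCast_nonneg _

theorem shiftRight_nonneg (a : Int) (s : Nat) (h : 0 ≤ a) : 0 ≤ a >>> s := by
  have : a = ((a.toNat : Nat) : Int) := (Int.toNat_of_nonneg h).symm
  rw [this]
  exact Int.natCast_nonneg _

theorem mem_newSums (c y : Int) (seq : List Int) :
    y ∈ (Std.HashSet.ofList (seq.map (fun x => c + x))).insert (2 * c)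
      ↔ (∃ x ∈ seq, y = c + x) ∨ y = 2 * c := by
  simp only [Std.HashSet.mem_insert, Std.HashSet.mem_ofList, List.contains_eq_mem,
    decide_eq_true_eq, beq_iff_eq, List.mem_map]
  constructor
  · rintro (rfl | ⟨x, hx, rfl⟩)
    · exact Or.inr rfl
    · exact Or.inl ⟨x, hx, rfl⟩
  · rintro (⟨x, hx, rfl⟩ | rfl)
    · exact Or.inr ⟨x, hx, rfl⟩
    · exact Or.inl rfl

-- A's disjointness test coincides with B's bitmask test
theorem cond_equiv (c : Int) (seq : List Int) (sums : Std.HashSet Int) (D m : Int)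
    (hb : ∀ x ∈ seq, x < c)
    (hs : ∀ y, y ∈ sums ↔ ∃ a ∈ seq, ∃ b ∈ seq, y = a + b)
    (hD0 : 0 ≤ D) (hD : ∀ d : Nat, D.toNat.testBit d = true ↔ IsDiff seq (d : Int))
    (hm0 : 0 ≤ m) (hm : ∀ d : Nat, m.toNat.testBit d = true ↔ ∃ x ∈ seq, (d : Int) = c - x) :
    ((Std.HashSet.ofList (seq.map (fun x => c + x))).insert (2 * c)).toList.all
        (fun y => !sums.contains y)
    = (PySem.Int.band D m == 0) := by
  rw [Bool.eq_iff_iff, List.all_eq_true, beq_iff_eq,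
    PySem.Int.band_of_nonneg hD0 hm0]
  rw [show ((0 : Int) = ((0 : Nat) : Int)) from rfl, Int.natCast_inj, land_eq_zero_iff]
  have hmem : ∀ y : Int,
      y ∈ ((Std.HashSet.ofList (seq.map (fun x => c + x))).insert (2 * c)).toList
        ↔ (∃ x ∈ seq, y = c + x) ∨ y = 2 * c := by
    intro y; rw [Std.HashSet.mem_toList, mem_newSums]
  constructor
  · -- disjoint → no bit is shared
    intro hdis i ⟨hDi, hmi⟩
    obtain ⟨x, hx, hix⟩ := (hm i).mp hmi
    obtain ⟨a, ha, b, hb', hlt, heq⟩ := (hD i).mp hDi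
    -- c - x = a - b, so c + b = a + x ∈ sums; and c + b is a new sum
    have hsum : (c + b) ∈ sums := by
      rw [hs]; exact ⟨a, ha, x, hx, by omega⟩
    have hnew : (c + b) ∈ ((Std.HashSet.ofList (seq.map (fun x => c + x))).insert (2 * c)).toList := by
      rw [hmem]; exact Or.inl ⟨b, hb', rfl⟩
    have := hdis _ hnew
    rw [Bool.not_eq_eq_eq_not, Bool.not_true, ← Bool.not_eq_true,
      Std.HashSet.contains_iff_mem] at this
    exact this hsum
  · -- no shared bit → disjoint
    intro hall y hy
    rw [Bool.not_eq_eq_eq_not, Bool.not_true, ← Bool.not_eq_true,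
      Std.HashSet.contains_iff_mem]
    intro hmems
    rw [hs] at hmems
    obtain ⟨a, ha, b, hb', heq⟩ := hmems
    rw [hmem] at hy
    rcases hy with ⟨x, hx, rfl⟩ | rfl
    · -- y = c + x; y = a + b, so c - a = b - x > 0 is an attained difference
      have hac : a < c := hb a ha
      have hxb : x < b := by omega
      refine hall (c - a).toNat ⟨?_, ?_⟩
      · rw [hD]
        exact ⟨b, hb', x, hx, by omega, by omega⟩
      · rw [hm]
        exact ⟨a, ha, by omega⟩
    · -- y = 2c is too large to be an old sum
      have h1 : a < c := hb a ha
      have h2 : b < c := hb b hb'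
      omega

-- ===== VERDICT-SUPPORT: the two loops agree step for step =====
theorem bridge (size : Int) (f : Nat) :
    ∀ (seq : List Int) (sums : Std.HashSet Int) (D R base c : Int),
      BInv seq sums D R base c →
      mianLoopA size f seq sums c = mianLoopB size f seq D R base c := by
  induction f with
  | zero => intro seq sums D R base c _; rfl
  | succ f ih =>
    intro seq sums D R base c hinv
    obtain ⟨hb, hc1, hcb, hD0, hR0, hs, hD, hR⟩ := hinv
    simp only [mianLoopA, mianLoopB]
    by_cases hlen : (seq.length : Int) < size
    · simp only [if_pos hlen]
      set base' : Int := if base < c then 2 * c else base with hbase'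
      set R' : Int := if base < c then R <<< (2 * c - base).toNat else R with hR'
      have hcb' : c ≤ base' := by
        rw [hbase']; split <;> omega
      have hR'0 : 0 ≤ R' := by
        rw [hR']; split
        · exact shiftLeft_nonneg R _ hR0
        · exact hR0
      -- characterization of R' after the rebase
      have hR'bit : ∀ k : Nat, R'.toNat.testBit k = true ↔ ∃ x ∈ seq, (k : Int) = base' - x := by
        intro k
        rw [hR']
        by_cases hrb : base < c
        · simp only [if_pos hrb]
          rw [shiftLeft_toNat R _ hR0, Nat.testBit_shiftLeft]
          have hcast : ((2 * c - base).toNat : Int) = 2 * c - base := by omega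
          by_cases hk : (2 * c - base).toNat ≤ k
          · simp only [ge_iff_le, hk, decide_true, Bool.true_and]
            rw [hR (k - (2 * c - base).toNat)]
            have hcast2 : ((k - (2 * c - base).toNat : Nat) : Int)
                = (k : Int) - (2 * c - base) := by omega
            rw [hcast2]
            constructor
            · rintro ⟨x, hx, hxe⟩
              refine ⟨x, hx, ?_⟩
              have := hb x hx
              rw [hbase']; simp only [if_pos hrb]; omega
            · rintro ⟨x, hx, hxe⟩
              refine ⟨x, hx, ?_⟩
              rw [hbase'] at hxe; simp only [if_pos hrb] at hxe; omega
          · simp only [ge_iff_le, hk, decide_false, Bool.false_and]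
            constructor
            · intro h; cases h
            · rintro ⟨x, hx, hxe⟩
              -- x = base' - k would exceed base, impossible since x ≤ base
              have hxb := hb x hx
              rw [hbase'] at hxe; simp only [if_pos hrb] at hxe
              omega
        · simp only [if_neg hrb]
          rw [hR k]
          rw [hbase']; simp only [if_neg hrb]
      -- characterization of the tested mask m
      set m : Int := R' >>> (base' - c).toNat with hm'
      have hm0 : 0 ≤ m := shiftRight_nonneg R' _ hR'0
      have hmbit : ∀ d : Nat, m.toNat.testBit d = true ↔ ∃ x ∈ seq, (d : Int) = c - x := by
        intro d
        rw [hm', shiftRight_toNat R' _ hR'0, Nat.testBit_shiftRight, hR'bit]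
        have hcast : (((base' - c).toNat + d : Nat) : Int) = base' - c + d := by omega
        rw [hcast]
        constructor
        · rintro ⟨x, hx, hxe⟩; exact ⟨x, hx, by omega⟩
        · rintro ⟨x, hx, hxe⟩; exact ⟨x, hx, by omega⟩
      rw [cond_equiv c seq sums D m (fun x hx => (hb x hx).2) hs hD0 hD hm0 hmbit]
      by_cases hok : (PySem.Int.band D m == 0) = true
      · simp only [if_pos hok]
        apply ih
        refine ⟨?_, by omega, by omega, ?_, ?_, ?_, ?_, ?_⟩
        · intro x hx
          rcases List.mem_append.mp hx with hx | hx
          · have := hb x hx; constructor <;> omega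
          · rw [List.mem_singleton] at hx; constructor <;> omega
        · rw [PySem.Int.bor_of_nonneg hD0 hm0]
          exact Int.natCast_nonneg _
        · rw [PySem.Int.bor_of_nonneg hR'0 (by positivity)]
          exact Int.natCast_nonneg _
        · -- sums ∪ new_sums describes the pairwise sums of seq ++ [c]
          intro y
          simp only [Std.HashSet.mem_insertMany_list, List.contains_eq_mem, decide_eq_true_eq,
            Std.HashSet.mem_toList, mem_newSums]
          rw [hs y]
          constructor
          · intro h
            rcases h with ⟨a, ha, b, hb', rfl⟩ | h
            · exact ⟨a, List.mem_append.mpr (Or.inl ha), b, List.mem_append.mpr (Or.inl hb'), rfl⟩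
            · rcases h with ⟨x, hx, rfl⟩ | rfl
              · exact ⟨c, by simp, x, List.mem_append.mpr (Or.inl hx), rfl⟩
              · exact ⟨c, by simp, c, by simp, by ring⟩
          · rintro ⟨a, ha, b, hb', rfl⟩
            rcases List.mem_append.mp ha with ha | ha <;>
              rcases List.mem_append.mp hb' with hb'' | hb''
            · exact Or.inl ⟨a, ha, b, hb'', rfl⟩
            · rw [List.mem_singleton] at hb''
              exact Or.inr (Or.inl ⟨a, ha, by omega⟩)
            · rw [List.mem_singleton] at ha
              exact Or.inr (Or.inl ⟨b, hb'', by omega⟩)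
            · rw [List.mem_singleton] at ha hb''
              exact Or.inr (Or.inr (by omega))
        · -- diffbits | m describes the differences of seq ++ [c]
          intro d
          rw [PySem.Int.bor_of_nonneg hD0 hm0, Int.toNat_natCast, Nat.testBit_or,
            Bool.or_eq_true, hD d, hmbit d]
          constructor
          · rintro (⟨a, ha, b, hb', hlt, he⟩ | ⟨x, hx, he⟩)
            · exact ⟨a, List.mem_append.mpr (Or.inl ha), b,
                List.mem_append.mpr (Or.inl hb'), hlt, he⟩
            · exact ⟨c, by simp, x, List.mem_append.mpr (Or.inl hx), (hb x hx).2, he⟩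
          · rintro ⟨a, ha, b, hb', hlt, he⟩
            rcases List.mem_append.mp ha with ha | ha <;>
              rcases List.mem_append.mp hb' with hb'' | hb''
            · exact Or.inl ⟨a, ha, b, hb'', hlt, he⟩
            · rw [List.mem_singleton] at hb''
              exact absurd hlt (by have := hb a ha; omega)
            · rw [List.mem_singleton] at ha
              exact Or.inr ⟨b, hb'', by omega⟩
            · rw [List.mem_singleton] at ha hb''
              exact absurd hlt (by omega)
        · -- revbits | 1 << (base' - c) describes seq ++ [c] relative to base'
          intro k
          rw [PySem.Int.bor_of_nonneg hR'0 (by positivity), Int.toNat_natCast,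
            Nat.testBit_or, Bool.or_eq_true, hR'bit k]
          simp only [Int.toNat_natCast]
          rw [Nat.testBit_shiftLeft]
          simp only [Bool.and_eq_true, decide_eq_true_eq,
            Nat.testBit_one_eq_true_iff_self_eq_zero, ge_iff_le]
          constructor
          · rintro (⟨x, hx, he⟩ | ⟨h1, h2⟩)
            · exact ⟨x, List.mem_append.mpr (Or.inl hx), he⟩
            · exact ⟨c, by simp, by omega⟩
          · rintro ⟨x, hx, he⟩
            rcases List.mem_append.mp hx with hx | hx
            · exact Or.inl ⟨x, hx, he⟩
            · rw [List.mem_singleton] at hx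
              subst hx
              exact Or.inr ⟨by omega, by omega⟩
      · simp only [if_neg hok]
        apply ih
        refine ⟨?_, by omega, by omega, hD0, hR'0, hs, hD, hR'bit⟩
        intro x hx
        have := hb x hx; constructor <;> omega
    · simp only [if_neg hlen]

-- ===== VERDICT (by name: the statement is the Claim_ definition above) =====
theorem mian_chowla_spec : Claim_equal_mian_chowla := by
  intro size _
  unfold Spec_mian_chowla mian_chowla mian_chowla_alt
  apply bridge
  refine ⟨?_, by omega, by omega, by omega, by omega, ?_, ?_, ?_⟩
  · intro x hx
    rw [List.mem_singleton] at hx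
    subst hx; constructor <;> omega
  · intro y
    simp only [Std.HashSet.mem_ofList, List.contains_eq_mem, decide_eq_true_eq,
      List.mem_singleton]
    constructor
    · intro hy
      exact ⟨0, by simp, 0, by simp, by omega⟩
    · rintro ⟨a, ha, b, hb, rfl⟩
      omega
  · intro d
    simp only [Int.toNat_zero, Nat.zero_testBit, IsDiff, List.mem_singleton]
    constructor
    · intro h; cases h
    · rintro ⟨a, rfl, b, rfl, hlt, -⟩; omega
  · intro k
    have : (1 : Int).toNat = 1 := rfl
    rw [this, Nat.testBit_one_eq_true_iff_self_eq_zero]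
    simp only [List.mem_singleton]
    constructor
    · intro h; exact ⟨0, rfl, by omega⟩
    · rintro ⟨x, rfl, he⟩; omega
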